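-- pv_equiv track=rewrite | github.com/CepbluKot/logs-summarizer | llm_log_summarizer/summary_contract.py | merge_coverages
-- ===== SOURCE A (Python) =====
-- from typing import Any, Dict, Iterable, List
--
-- def merge_coverages(payloads: Iterable[Dict[str, Any]]) -> Dict[str, int]:
--     rows = 0
--     signatures = 0
--     top_considered = 0
--     for payload in payloads:
--         coverage = payload.get("coverage", {})
--         if not isinstance(coverage, dict):
--             continue
--         rows += _safe_int(coverage.get("input_rows"), default=0)
--         signatures += _safe_int(coverage.get("input_signatures"), default=0)
--         top_considered += _safe_int(coverage.get("top_signatures_considered"), default=0)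
--     return {
--         "input_rows": rows,
--         "input_signatures": signatures,
--         "top_signatures_considered": top_considered,
--     }
--
-- def _safe_int(value: Any, *, default: int) -> int:
--     try:
--         parsed = int(value)
--     except Exception:  # noqa: BLE001
--         return default
--     if parsed < 0:
--         return 0
--     return parsed
-- ===== SOURCE B (Python) =====
-- def merge_coverages(payloads):
--     items = list(payloads)
--     return {
--         "input_rows": _sum_key(items, "input_rows"),
--         "input_signatures": _sum_key(items, "input_signatures"),
--         "top_signatures_considered": _sum_key(items, "top_signatures_considered"),
--     }
--
-- def _sum_key(items, key):
--     return sum(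
--         _safe_int(c.get(key), default=0)
--         for p in items
--         if isinstance((c := p.get("coverage", {})), dict)
--     )
--
-- def _safe_int(value, *, default):
--     try:
--         parsed = int(value)
--     except Exception:
--         return default
--     if parsed < 0:
--         return 0
--     return parsed
-- ===== Notes on version B (the rewrite author's own statement) =====
-- stated objective: alternative
-- what changed: Replaces A's single fused loop carrying three accumulators with three independent per-key passes (sum over a generator) sharing a _sum_key helper.
import Mathlib
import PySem

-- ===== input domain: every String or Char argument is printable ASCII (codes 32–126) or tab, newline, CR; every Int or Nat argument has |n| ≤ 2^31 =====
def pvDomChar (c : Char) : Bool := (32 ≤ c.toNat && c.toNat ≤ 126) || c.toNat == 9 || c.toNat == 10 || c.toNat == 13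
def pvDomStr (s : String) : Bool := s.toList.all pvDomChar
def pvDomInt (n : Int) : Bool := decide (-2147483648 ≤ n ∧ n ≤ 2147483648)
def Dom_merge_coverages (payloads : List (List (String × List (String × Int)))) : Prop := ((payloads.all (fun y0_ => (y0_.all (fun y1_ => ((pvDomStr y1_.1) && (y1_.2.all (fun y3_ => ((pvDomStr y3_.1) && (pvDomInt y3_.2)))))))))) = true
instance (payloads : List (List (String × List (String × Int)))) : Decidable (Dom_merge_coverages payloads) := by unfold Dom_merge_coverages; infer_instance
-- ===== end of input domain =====

-- B replaces A's single fused loop carrying three accumulators with three independent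
-- per-key passes; equivalence of the two decompositions is proved (objective: alternative).

-- ===== PORT A =====
-- _safe_int: on this typed domain the value is either a missing key (int(None) raises
-- TypeError -> default) or an Int (negatives clamp to 0); exact on Dom.
def safeIntA (value : Option Int) (dflt : Int) : Int :=
  match value with
  | none => dflt
  | some parsed => if parsed < 0 then 0 else parsed

-- literal port of A's fused loop (the isinstance(coverage, dict) guard is always true
-- on this typed domain, so the 'continue' branch is unreachable)
def merge_coverages (payloads : List (List (String × List (String × Int)))) : List (String × Int) :=
  let st := payloads.foldl (fun (acc : Int × Int × Int) payload =>
    let coverage := (PySem.Dict.mk payload).getD "coverage" []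
    (acc.1 + safeIntA ((PySem.Dict.mk coverage).get? "input_rows") 0,
     acc.2.1 + safeIntA ((PySem.Dict.mk coverage).get? "input_signatures") 0,
     acc.2.2 + safeIntA ((PySem.Dict.mk coverage).get? "top_signatures_considered") 0))
    (0, 0, 0)
  [("input_rows", st.1), ("input_signatures", st.2.1),
   ("top_signatures_considered", st.2.2)]

-- ===== PORT B =====
def safeIntB (value : Option Int) (dflt : Int) : Int :=
  match value with
  | none => dflt
  | some parsed => if parsed < 0 then 0 else parsed

-- _sum_key: one independent pass summing the clamped value of one key
def sumKey (items : List (List (String × List (String × Int)))) (key : String) : Int :=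
  (items.map (fun p =>
    safeIntB ((PySem.Dict.mk ((PySem.Dict.mk p).getD "coverage" [])).get? key) 0)).sum

def merge_coverages_alt (payloads : List (List (String × List (String × Int)))) : List (String × Int) :=
  let items := payloads
  [("input_rows", sumKey items "input_rows"),
   ("input_signatures", sumKey items "input_signatures"),
   ("top_signatures_considered", sumKey items "top_signatures_considered")]

-- ===== PRECONDITION & SPEC =====
def Spec_merge_coverages (payloads : List (List (String × List (String × Int)))) (out : List (String × Int)) : Prop := out = merge_coverages_alt payloads
instance (payloads : List (List (String × List (String × Int)))) (out : List (String × Int)) : Decidable (Spec_merge_coverages payloads out) := by unfold Spec_merge_coverages; infer_instance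

-- ===== CLAIM (what is proved, stated in full; the proofs are below) =====
def Claim_equal_merge_coverages : Prop := ∀ (payloads : List (List (String × List (String × Int)))), Dom_merge_coverages payloads → Spec_merge_coverages payloads (merge_coverages payloads)

-- ===== LEMMAS AND PROOFS =====

-- the fused fold equals the three independent sums, for any starting accumulator
theorem fold_eq_sums (l : List (List (String × List (String × Int)))) :
    ∀ (a b c : Int),
      l.foldl (fun (acc : Int × Int × Int) payload =>
        let coverage := (PySem.Dict.mk payload).getD "coverage" []
        (acc.1 + safeIntA ((PySem.Dict.mk coverage).get? "input_rows") 0,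
         acc.2.1 + safeIntA ((PySem.Dict.mk coverage).get? "input_signatures") 0,
         acc.2.2 + safeIntA ((PySem.Dict.mk coverage).get? "top_signatures_considered") 0))
        (a, b, c)
      = (a + sumKey l "input_rows", b + sumKey l "input_signatures",
         c + sumKey l "top_signatures_considered") := by
  induction l with
  | nil => intro a b c; simp [sumKey]
  | cons p rest ih =>
      intro a b c
      simp only [List.foldl_cons, ih, sumKey, List.map_cons, List.sum_cons]
      refine Prod.ext ?_ (Prod.ext ?_ ?_) <;> simp [safeIntA, safeIntB] <;> ring

-- ===== VERDICT (by name: the statement is the Claim_ definition above) =====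
theorem merge_coverages_spec : Claim_equal_merge_coverages := by
  intro payloads _
  unfold Spec_merge_coverages merge_coverages merge_coverages_alt
  simp [fold_eq_sums]
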